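-- pv_equiv track=rewrite | github.com/JOOCHANN/Programmers_algorithm | level2/Translated_parentheses.py | solution
-- ===== SOURCE A (Python) =====
-- from collections import Counter
--
-- def solution(p):
--     # 1.
--     if not p:
--         return p
--     # 2.
--     u, v = n_2(p)
--     # 3.
--     if is_right_3(u):
--         return u + solution(v)
--     else: # 4.
--         # 4-1.
--         answer = "("
--         # 4-2.
--         answer += solution(v)
--         # 4-3.
--         answer += ")"
--         # 4-4.
--         for p in u[1:-1]:
--             if p == '(':
--                 answer += ')'
--             else:
--                 answer += '('
--
--     return answer
--
-- def n_2(p):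
--     u, v = '', ''
--     len_p = len(p)
--     half = len_p//2
--     for i in range(2, len_p+1, 2):
--         c = Counter(p[0:i])
--         if c["("] == c[")"]:
--             u += p[0:i]
--             v = p[i:]
--             break
--     return u, v
--
-- def is_right_3(u):
--     c = 0
--     right_string = True
--     for i in u:
--         if i == "(":
--             c+=1
--         else:
--             c-=1
--         if c < 0:
--             right_string = False
--
--     return right_string
-- ===== SOURCE B (Python) =====
-- def is_correct(u):
--     c = 0
--     for ch in u:
--         c = c + 1 if ch == '(' else c - 1
--         if c < 0:
--             return False
--     return True
--
-- def solution(p):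
--     # Iterative single pass: recursion becomes an explicit stack of deferred
--     # closing tails; each split is found with incremental running counts
--     # (a balanced chunk has even length, so advance two characters at a time).
--     res = []        # output pieces, in order
--     tails = []      # suffixes created by wrong chunks, emitted LIFO at the end
--     i = 0
--     n = len(p)
--     while i < n:
--         opens = 0
--         closes = 0
--         end = None
--         for j in range(i + 2, n + 1, 2):
--             for ch in (p[j - 2], p[j - 1]):
--                 if ch == '(':
--                     opens += 1
--                 elif ch == ')':
--                     closes += 1
--             if opens == closes:
--                 end = j
--                 break
--         if end is None:
--             break  # no balanced chunk exists: the remainder contributes nothing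
--         u = p[i:end]
--         if is_correct(u):
--             res.append(u)
--         else:
--             res.append('(')
--             tails.append(')' + ''.join(')' if c == '(' else '(' for c in u[1:-1]))
--         i = end
--     res.extend(reversed(tails))
--     return ''.join(res)
-- ===== Notes on version B (the rewrite author's own statement) =====
-- stated objective: faster
-- what changed: A recursively splits the string, rebuilding a collections.Counter over every growing prefix to find each balanced chunk; B is a single iterative left-to-right pass that finds each chunk with incremental running open/close counts (two characters per step), checks chunk correctness with an early-return balance scan, and replaces the recursion by an explicit stack of deferred closing tails, joined once at the end.
import Mathlib
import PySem

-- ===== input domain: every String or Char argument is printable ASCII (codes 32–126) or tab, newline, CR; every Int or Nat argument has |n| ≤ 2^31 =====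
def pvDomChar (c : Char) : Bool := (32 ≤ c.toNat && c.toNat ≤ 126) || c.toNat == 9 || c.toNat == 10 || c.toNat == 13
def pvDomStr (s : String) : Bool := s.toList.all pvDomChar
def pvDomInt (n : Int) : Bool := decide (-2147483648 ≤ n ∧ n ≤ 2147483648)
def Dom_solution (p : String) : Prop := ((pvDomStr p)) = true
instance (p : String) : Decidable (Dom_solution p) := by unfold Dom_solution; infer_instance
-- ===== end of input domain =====

-- B replaces A's recursion with per-prefix Counter rebuilds by one iterative left-to-right pass:
-- each split is found with incremental running counts (two characters at a time), the recursion
-- becomes an explicit stack of deferred closing tails; return-value equivalence is proved for all strings.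

-- ===== PORT A =====
-- n_2's loop: for i in range(2, len_p+1, 2): c = Counter(p[0:i]); if c["("]==c[")"]: u += p[0:i]; v = p[i:]; break
def n2Loop (chars : List Char) (rng : List Int) : List Char × List Char :=
  match rng with
  | [] => ([], [])
  | i :: rest =>
    let pref := PySem.List.slice chars (some 0) (some i)
    if pref.count '(' = pref.count ')' then
      (pref, PySem.List.slice chars (some i) none)
    else n2Loop chars rest

def n2 (chars : List Char) : List Char × List Char :=
  n2Loop chars (PySem.List.pyRange 2 ((chars.length : Int) + 1) 2)

-- is_right_3: c = 0; right = True; for i in u: c ± 1; if c < 0: right = False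
def isRight3 (u : List Char) : Bool :=
  (u.foldl (fun (st : Int × Bool) ch =>
      let c := if ch = '(' then st.1 + 1 else st.1 - 1
      (c, if c < 0 then false else st.2)) ((0 : Int), true)).2

-- step 4-4: for p in u[1:-1]: answer += ')' if p == '(' else '('
def flipA (u : List Char) : List Char :=
  (PySem.List.slice u (some 1) (some (-1))).foldl
    (fun acc ch => acc ++ [if ch = '(' then ')' else '(']) []

-- fuel = length + 1 suffices: each recursive call strictly shortens the string (or reaches "")
def solutionAux : Nat → List Char → List Char
  | 0, _ => []
  | fuel + 1, chars =>
    if chars = [] then chars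
    else
      let uv := n2 chars
      if isRight3 uv.1 then uv.1 ++ solutionAux fuel uv.2
      else ('(' :: solutionAux fuel uv.2) ++ [')'] ++ flipA uv.1

def solution (p : String) : String := String.ofList (solutionAux (p.toList.length + 1) p.toList)

-- ===== PORT B =====
-- is_correct: c = 0; for ch in u: c ± 1; if c < 0: return False; return True
def isCorrect (c : Int) : List Char → Bool
  | [] => true
  | ch :: rest =>
    let c' := if ch = '(' then c + 1 else c - 1
    if c' < 0 then false else isCorrect c' rest

-- inner for-loop of Source B (j ranges over even offsets from i, two characters per step, ported
-- relative to the current suffix): running opens/closes counts; some = the chunk's end offset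
def scanPairs (opens closes : Int) (j : Nat) : List Char → Option Nat
  | c1 :: c2 :: rest =>
    let o1 := if c1 = '(' then opens + 1 else opens
    let cl1 := if c1 = ')' then closes + 1 else closes
    let o2 := if c2 = '(' then o1 + 1 else o1
    let cl2 := if c2 = ')' then cl1 + 1 else cl1
    if o2 = cl2 then some (j + 2) else scanPairs o2 cl2 (j + 2) rest
  | _ => none

-- ''.join(')' if c == '(' else '(' for c in u[1:-1])
def flipB (u : List Char) : List Char :=
  (PySem.List.slice u (some 1) (some (-1))).map (fun c => if c = '(' then ')' else '(')

-- the while loop, with res/tails accumulators; fuel = length + 1 suffices (the cut point advances)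
def loopB : Nat → List Char → List (List Char) → List (List Char) → List Char
  | 0, _, res, tails => (res ++ tails.reverse).flatten
  | fuel + 1, suffix, res, tails =>
    if suffix = [] then (res ++ tails.reverse).flatten
    else
      match scanPairs 0 0 0 suffix with
      | none => (res ++ tails.reverse).flatten
      | some e =>
        let u := suffix.take e
        if isCorrect 0 u then loopB fuel (suffix.drop e) (res ++ [u]) tails
        else loopB fuel (suffix.drop e) (res ++ [['(']]) (tails ++ [')' :: flipB u])

def solution_alt (p : String) : String :=
  String.ofList (loopB (p.toList.length + 1) p.toList [] [])

-- ===== PRECONDITION & SPEC =====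
def Spec_solution (p : String) (out : String) : Prop := out = solution_alt p
instance (p : String) (out : String) : Decidable (Spec_solution p out) := by unfold Spec_solution; infer_instance

-- ===== CLAIM (what is proved, stated in full; the proofs are below) =====
def Claim_equal_solution : Prop := ∀ (p : String), Dom_solution p → Spec_solution p (solution p)

-- ===== LEMMAS AND PROOFS =====

-- A's canonical split search: first even j ∈ {2,4,…} with equally many '(' and ')' in the prefix
def firstSplit (chars : List Char) : Option Nat :=
  ((List.range (chars.length / 2)).map (fun k => 2 * k + 2)).find?
    (fun j => (chars.take j).count '(' == (chars.take j).count ')')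

-- A's split loop, related to the canonical even-position search
theorem n2Loop_eq (chars : List Char) (ks : List Nat) :
    n2Loop chars (ks.map (fun k => ((2 * k + 2 : Nat) : Int))) =
      (match (ks.map (fun k => 2 * k + 2)).find? (fun j => (chars.take j).count '(' == (chars.take j).count ')') with
      | some j => (chars.take j, chars.drop j)
      | none => ([], [])) := by
  induction ks with
  | nil => simp [n2Loop]
  | cons k rest ih =>
    rw [List.map_cons, List.map_cons, n2Loop]
    have hsl : PySem.List.slice chars (some 0) (some ((2 * k + 2 : Nat) : Int)) = chars.take (2 * k + 2) := by
      rw [PySem.List.slice_zero_start, PySem.List.slice_to_natCast]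
    have hsl2 : PySem.List.slice chars (some ((2 * k + 2 : Nat) : Int)) none = chars.drop (2 * k + 2) := by
      rw [PySem.List.slice_from_natCast]
    simp only [hsl, hsl2]
    by_cases hc : (chars.take (2 * k + 2)).count '(' = (chars.take (2 * k + 2)).count ')'
    · rw [if_pos hc, List.find?_cons_of_pos (by simpa using hc)]
    · rw [if_neg hc, List.find?_cons_of_neg (by simpa using hc), ih]

theorem n2_eq (chars : List Char) :
    n2 chars = (match firstSplit chars with
      | some j => (chars.take j, chars.drop j)
      | none => ([], [])) := by
  have key : PySem.List.pyRange 2 ((chars.length : Int) + 1) 2 =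
      (List.range (chars.length / 2)).map (fun k => ((2 * k + 2 : Nat) : Int)) := by
    rw [PySem.List.pyRange_of_pos 2 ((chars.length : Int) + 1) (by norm_num)]
    have hcount : (if (2 : Int) < (chars.length : Int) + 1 then ((((chars.length : Int) + 1) - 2 + 2 - 1) / 2).toNat else 0) = chars.length / 2 := by
      by_cases h : (2 : Int) < (chars.length : Int) + 1
      · rw [if_pos h]
        have : (((chars.length : Int) + 1) - 2 + 2 - 1) = (chars.length : Int) := by ring
        rw [this]; omega
      · rw [if_neg h]; omega
    rw [hcount]
    apply List.map_congr_left
    intro k _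
    push_cast; ring
  rw [n2, key, n2Loop_eq, firstSplit]

theorem take_two (pre rest : List Char) (c1 c2 : Char) :
    (pre ++ c1 :: c2 :: rest).take (pre.length + 2) = pre ++ [c1, c2] := by
  rw [show pre ++ c1 :: c2 :: rest = (pre ++ [c1, c2]) ++ rest by simp]
  rw [List.take_append_of_le_length (by simp)]
  simp

-- B's pairwise scan, related to the same canonical search (positions pre.length+2, pre.length+4, …)
theorem scanPairs_gen : ∀ (l pre : List Char),
    scanPairs ((pre.count '(' : Int)) ((pre.count ')' : Int)) pre.length l =
      ((List.range (l.length / 2)).map (fun k => pre.length + (2 * k + 2))).find?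
        (fun j => ((pre ++ l).take j).count '(' == ((pre ++ l).take j).count ')')
  | [], _ => by simp [scanPairs]
  | [x], _ => by simp [scanPairs]
  | c1 :: c2 :: rest, pre => by
    have hO : (if c2 = '(' then (if c1 = '(' then (pre.count '(' : Int) + 1 else (pre.count '(' : Int)) + 1
          else (if c1 = '(' then (pre.count '(' : Int) + 1 else (pre.count '(' : Int)))
        = ((pre ++ [c1, c2]).count '(' : Int) := by
      simp [List.count_append, List.count_cons]
      by_cases h1 : c1 = '(' <;> by_cases h2 : c2 = '(' <;> simp [h1, h2] <;> push_cast <;> ring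
    have hC : (if c2 = ')' then (if c1 = ')' then (pre.count ')' : Int) + 1 else (pre.count ')' : Int)) + 1
          else (if c1 = ')' then (pre.count ')' : Int) + 1 else (pre.count ')' : Int)))
        = ((pre ++ [c1, c2]).count ')' : Int) := by
      simp [List.count_append, List.count_cons]
      by_cases h1 : c1 = ')' <;> by_cases h2 : c2 = ')' <;> simp [h1, h2] <;> push_cast <;> ring
    have hrange : List.range ((c1 :: c2 :: rest).length / 2) =
        0 :: (List.range (rest.length / 2)).map (· + 1) := by
      have : (c1 :: c2 :: rest).length / 2 = rest.length / 2 + 1 := by simp; omega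
      rw [this, List.range_succ_eq_map]
    rw [scanPairs]
    simp only [hO, hC]
    rw [hrange, List.map_cons, List.find?_cons]
    have htk : (pre ++ c1 :: c2 :: rest).take (pre.length + (2 * 0 + 2)) = pre ++ [c1, c2] := by
      simpa using take_two pre rest c1 c2
    by_cases heq : ((pre ++ [c1, c2]).count '(' : Int) = ((pre ++ [c1, c2]).count ')' : Int)
    · have hb : (((pre ++ c1 :: c2 :: rest).take (pre.length + (2 * 0 + 2))).count '('
          == ((pre ++ c1 :: c2 :: rest).take (pre.length + (2 * 0 + 2))).count ')') = true := by
        rw [htk]; simp only [beq_iff_eq]; exact_mod_cast heq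
      rw [if_pos heq, hb]
    · have hb : (((pre ++ c1 :: c2 :: rest).take (pre.length + (2 * 0 + 2))).count '('
          == ((pre ++ c1 :: c2 :: rest).take (pre.length + (2 * 0 + 2))).count ')') = false := by
        rw [htk]; simp only [beq_eq_false_iff_ne]
        exact fun h => heq (by exact_mod_cast h)
      rw [if_neg heq, hb]
      have ih := scanPairs_gen rest (pre ++ [c1, c2])
      rw [show (pre ++ [c1, c2]) ++ rest = pre ++ c1 :: c2 :: rest by simp] at ih
      rw [show (pre ++ [c1, c2]).length = pre.length + 2 by simp] at ih
      rw [ih, List.map_map]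
      congr 1
      apply List.map_congr_left
      intro k _
      simp [Function.comp]
      omega

theorem scanPairs_eq (chars : List Char) :
    scanPairs 0 0 0 chars = firstSplit chars := by
  have h := scanPairs_gen chars []
  simp only [List.count_nil, Nat.cast_zero, List.length_nil, List.nil_append, Nat.zero_add] at h
  rw [h, firstSplit]

-- A's flag-carrying fold is the early-return is_correct (a false flag is permanent)
theorem foldA_eq_isCorrect (l : List Char) : ∀ (b : Int) (flag : Bool),
    (l.foldl (fun (st : Int × Bool) ch =>
        let c := if ch = '(' then st.1 + 1 else st.1 - 1
        (c, if c < 0 then false else st.2)) (b, flag)).2 = (flag && isCorrect b l) := by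
  induction l with
  | nil => intro b flag; simp [isCorrect]
  | cons ch rest ih =>
    intro b flag
    simp only [List.foldl_cons, isCorrect]
    by_cases hc : (if ch = '(' then b + 1 else b - 1) < 0
    · simp only [if_pos hc, ih]
      simp
    · simp only [if_neg hc, ih]

theorem isRight3_eq (u : List Char) : isRight3 u = isCorrect 0 u := by
  rw [isRight3, foldA_eq_isCorrect]
  simp

theorem foldl_append_map (f : Char → Char) (l : List Char) : ∀ (acc : List Char),
    l.foldl (fun acc ch => acc ++ [f ch]) acc = acc ++ l.map f := by
  induction l with
  | nil => intro acc; simp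
  | cons x xs ih => intro acc; simp [ih]

theorem flipA_eq (u : List Char) : flipA u = flipB u := by
  rw [flipA, flipB, foldl_append_map]
  simp

theorem solutionAux_nil (fuel : Nat) : solutionAux fuel [] = [] := by
  cases fuel <;> simp [solutionAux]

-- loop invariant: B's iteration with accumulators computes A's recursive value
theorem loopB_eq (fuel : Nat) : ∀ (suffix : List Char) (res tails : List (List Char)),
    loopB fuel suffix res tails =
      res.flatten ++ solutionAux fuel suffix ++ tails.reverse.flatten := by
  induction fuel with
  | zero => intro suffix res tails; simp [loopB, solutionAux]
  | succ fuel ih =>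
    intro suffix res tails
    rw [loopB, solutionAux]
    by_cases hnil : suffix = []
    · simp [hnil]
    · simp only [if_neg hnil]
      rw [scanPairs_eq, n2_eq]
      cases hfs : firstSplit suffix with
      | none =>
        have h3 : isRight3 ([] : List Char) = true := by decide
        simp [h3, solutionAux_nil]
      | some j =>
        rw [isRight3_eq]
        by_cases hm : isCorrect 0 (suffix.take j) = true
        · simp [hm, ih]
        · simp only [Bool.not_eq_true] at hm
          simp [hm, ih, flipA_eq]

-- ===== VERDICT (by name: the statement is the Claim_ definition above) =====
theorem solution_spec : Claim_equal_solution := by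
  intro p _
  unfold Spec_solution solution solution_alt
  rw [loopB_eq]
  simp
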